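-- pv_equiv track=rewrite | github.com/noorulameenkm/DataStructuresAlgorithms | DynamicProgramming/min_jumps_with_fee.py | find_min_fee_memoization_recursive
-- ===== SOURCE A (Python) =====
-- def find_min_fee_memoization_recursive(dp, fee, currentIndex):
--     n = len(fee)
--     if currentIndex > n-1:
--         return 0
--
--     if dp[currentIndex] == 0:
--         # if we take 1 step, we are left with 'n-1' steps
--         take1Step = find_min_fee_memoization_recursive(dp, fee, currentIndex + 1)
--         # similarly, if we took 2 steps, we are left with 'n-2' steps
--         take2Step = find_min_fee_memoization_recursive(dp, fee, currentIndex + 2)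
--         # if we took 3 steps, we are left with 'n-3' steps
--         take3Step = find_min_fee_memoization_recursive(dp, fee, currentIndex + 3)
--
--         dp[currentIndex] = fee[currentIndex] + min(take1Step, take2Step, take3Step)
--
--     return dp[currentIndex]
-- ===== SOURCE B (Python) =====
-- def find_min_fee_memoization_recursive(dp, fee, currentIndex):
--     # Bottom-up iterative DP over the same dp array (return-value equivalent to A;
--     # B may fill dp cells that A's recursion leaves untouched).
--     n = len(fee)
--     if currentIndex > n - 1:
--         return 0
--     if dp[currentIndex] != 0:
--         return dp[currentIndex]
--     for i in range(n - 1, currentIndex - 1, -1):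
--         if dp[i] == 0:
--             s1 = dp[i + 1] if i + 1 <= n - 1 else 0
--             s2 = dp[i + 2] if i + 2 <= n - 1 else 0
--             s3 = dp[i + 3] if i + 3 <= n - 1 else 0
--             dp[i] = fee[i] + min(s1, s2, s3)
--     return dp[currentIndex]
-- ===== Notes on version B (the rewrite author's own statement) =====
-- stated objective: alternative
-- what changed: A's top-down memoized recursion over the mutable dp array is replaced by a bottom-up iterative sweep from n-1 down to currentIndex that fills only still-zero cells, with the same base-case and cached-fast-path behaviour; return values agree (B may fill dp cells A's recursion never touches).
-- outside the precondition, e.g. on find_min_fee_memoization_recursive([0, 0, 0, 0, 0, 0], [1, -4, 3, 2, 3, 2], -3): A returns 1, B returns 2; on find_min_fee_memoization_recursive([0, 1, 1, 1], [5, 1, 1, 1, 1, 1], 0): A returns 6, B raises IndexError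
import Mathlib
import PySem

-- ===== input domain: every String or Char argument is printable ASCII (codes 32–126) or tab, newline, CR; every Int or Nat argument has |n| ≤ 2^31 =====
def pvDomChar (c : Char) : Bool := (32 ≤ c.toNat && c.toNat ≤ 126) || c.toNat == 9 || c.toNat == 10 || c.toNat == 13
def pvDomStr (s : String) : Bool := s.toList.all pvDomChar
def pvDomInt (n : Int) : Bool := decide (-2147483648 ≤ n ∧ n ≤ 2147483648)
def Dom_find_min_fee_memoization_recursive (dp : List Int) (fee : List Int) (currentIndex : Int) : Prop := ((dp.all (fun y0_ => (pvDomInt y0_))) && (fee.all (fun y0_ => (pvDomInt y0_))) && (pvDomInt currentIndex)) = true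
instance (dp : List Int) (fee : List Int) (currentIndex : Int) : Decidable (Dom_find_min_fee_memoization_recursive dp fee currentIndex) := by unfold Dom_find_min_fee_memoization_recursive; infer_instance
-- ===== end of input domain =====

-- B replaces A's top-down memoized recursion on the mutable dp array by a bottom-up
-- iterative sweep over the same array; the equivalence proved here is about the RETURN
-- value only (both mutate dp in place, and B may fill cells A's recursion leaves untouched).

-- ===== PORT A =====
-- A's recursion threads the mutated dp list as state: result = (returned value, dp after the call).
-- Out-of-range / negative reads and writes (excluded by Pre_) are totalised with pyGetD/pySetD.
def pvA_fma (dp : List Int) (fee : List Int) (currentIndex : Int) : Int × List Int :=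
  if currentIndex > (fee.length : Int) - 1 then (0, dp)
  else
    if PySem.List.pyGetD dp currentIndex 0 = 0 then
      let r1 := pvA_fma dp fee (currentIndex + 1)
      let r2 := pvA_fma r1.2 fee (currentIndex + 2)
      let r3 := pvA_fma r2.2 fee (currentIndex + 3)
      let dp4 := PySem.List.pySetD r3.2 currentIndex
        (PySem.List.pyGetD fee currentIndex 0 + min (min r1.1 r2.1) r3.1)
      (PySem.List.pyGetD dp4 currentIndex 0, dp4)
    else (PySem.List.pyGetD dp currentIndex 0, dp)
termination_by ((fee.length : Int) - currentIndex).toNat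
decreasing_by all_goals omega

def find_min_fee_memoization_recursive (dp : List Int) (fee : List Int) (currentIndex : Int) : Int :=
  (pvA_fma dp fee currentIndex).1

-- ===== PORT B =====
-- one iteration of B's 'for i in range(n-1, currentIndex-1, -1)' loop body
def pvB_step (fee : List Int) (n : Int) (d : List Int) (i : Int) : List Int :=
  if PySem.List.pyGetD d i 0 = 0 then
    let s1 := if i + 1 ≤ n - 1 then PySem.List.pyGetD d (i + 1) 0 else 0
    let s2 := if i + 2 ≤ n - 1 then PySem.List.pyGetD d (i + 2) 0 else 0
    let s3 := if i + 3 ≤ n - 1 then PySem.List.pyGetD d (i + 3) 0 else 0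
    PySem.List.pySetD d i (PySem.List.pyGetD fee i 0 + min (min s1 s2) s3)
  else d

def find_min_fee_memoization_recursive_alt (dp : List Int) (fee : List Int) (currentIndex : Int) : Int :=
  let n : Int := (fee.length : Int)
  if currentIndex > n - 1 then 0
  else if PySem.List.pyGetD dp currentIndex 0 ≠ 0 then PySem.List.pyGetD dp currentIndex 0
  else
    let dp' := (PySem.List.pyRange (n - 1) (currentIndex - 1) (-1)).foldl (pvB_step fee n) dp
    PySem.List.pyGetD dp' currentIndex 0

-- ===== PRECONDITION & SPEC =====
-- Pre_ excludes (a) negative currentIndex with currentIndex ≤ n-1, where Python's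
-- negative-index wraparound aliases memo cells with real cells so A's returned value is an
-- accident of its read/write order, and (b) dp shorter than fee — unless the cached
-- fast path dp[currentIndex] != 0 applies (that read, negative-wraparound included, makes
-- both programs return the cached cell, so it stays inside Pre_) — where A raises
-- IndexError or returns only because stale cache values happen to stop its recursion
-- before the missing cells (B's full sweep raises IndexError there).
def Pre_find_min_fee_memoization_recursive (dp : List Int) (fee : List Int) (currentIndex : Int) : Prop :=
  currentIndex > (fee.length : Int) - 1 ∨
  (0 ≤ currentIndex ∧ (fee.length : Int) ≤ (dp.length : Int)) ∨
  (PySem.Raise.InRange dp.length currentIndex ∧ PySem.List.pyGetD dp currentIndex 0 ≠ 0)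
instance (dp : List Int) (fee : List Int) (currentIndex : Int) : Decidable (Pre_find_min_fee_memoization_recursive dp fee currentIndex) := by unfold Pre_find_min_fee_memoization_recursive; infer_instance

def pvWitness_find_min_fee_memoization_recursive : List Int × List Int × Int := ([0, 0, 0], [1, 2, 3], 0)

def Spec_find_min_fee_memoization_recursive (dp : List Int) (fee : List Int) (currentIndex : Int) (out : Int) : Prop := out = find_min_fee_memoization_recursive_alt dp fee currentIndex
instance (dp : List Int) (fee : List Int) (currentIndex : Int) (out : Int) : Decidable (Spec_find_min_fee_memoization_recursive dp fee currentIndex out) := by unfold Spec_find_min_fee_memoization_recursive; infer_instance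

-- ===== CLAIM (what is proved, stated in full; the proofs are below) =====
def Claim_equal_find_min_fee_memoization_recursive : Prop := ∀ (dp : List Int) (fee : List Int) (currentIndex : Int), Dom_find_min_fee_memoization_recursive dp fee currentIndex → Pre_find_min_fee_memoization_recursive dp fee currentIndex → Spec_find_min_fee_memoization_recursive dp fee currentIndex (find_min_fee_memoization_recursive dp fee currentIndex)

-- ===== LEMMAS AND PROOFS =====

-- the common functional value: the unique fixpoint both programs compute, defined from the
-- ORIGINAL dp (stale nonzero cells are answers; zero cells take fee[i] + min of three jumps)
def pvG (dp0 : List Int) (fee : List Int) (i : Int) : Int :=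
  if i > (fee.length : Int) - 1 then 0
  else
    if PySem.List.pyGetD dp0 i 0 ≠ 0 then PySem.List.pyGetD dp0 i 0
    else PySem.List.pyGetD fee i 0 +
      min (min (pvG dp0 fee (i + 1)) (pvG dp0 fee (i + 2))) (pvG dp0 fee (i + 3))
termination_by ((fee.length : Int) - i).toNat
decreasing_by all_goals omega

-- read/write lemmas specialised to nonnegative Int indices
lemma pvGetD_setD_self (xs : List Int) (i v : Int) (h0 : 0 ≤ i) (h : i < (xs.length : Int)) :
    PySem.List.pyGetD (PySem.List.pySetD xs i v) i 0 = v := by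
  rw [PySem.List.pySetD_of_nonneg (h := h0), PySem.List.pyGetD_of_nonneg (h := h0)]
  have hlt : i.toNat < xs.length := by omega
  simp [List.getD, hlt]

lemma pvGetD_setD_ne (xs : List Int) (i j v : Int) (h0 : 0 ≤ i) (h0j : 0 ≤ j) (hne : j ≠ i) :
    PySem.List.pyGetD (PySem.List.pySetD xs i v) j 0 = PySem.List.pyGetD xs j 0 := by
  rw [PySem.List.pySetD_of_nonneg (h := h0), PySem.List.pyGetD_of_nonneg (h := h0j),
      PySem.List.pyGetD_of_nonneg (h := h0j)]
  have hne' : i.toNat ≠ j.toNat := by omega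
  simp [List.getD, List.getElem?_set_ne hne']

-- A-side state invariant: each nonnegative cell still holds its original value, or has been
-- filled with its pvG value (only possible for an originally-zero in-range cell)
def pvI (dp0 : List Int) (fee : List Int) (d : List Int) : Prop :=
  d.length = dp0.length ∧ ∀ j : Int, 0 ≤ j →
    (PySem.List.pyGetD d j 0 = PySem.List.pyGetD dp0 j 0 ∨
     (j ≤ (fee.length : Int) - 1 ∧ PySem.List.pyGetD d j 0 = pvG dp0 fee j ∧
      PySem.List.pyGetD dp0 j 0 = 0))

lemma pvA_correct (dp0 fee : List Int) (hn : (fee.length : Int) ≤ (dp0.length : Int))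
    (ci : Int) (hci : 0 ≤ ci) (d : List Int) (hI : pvI dp0 fee d) :
    (pvA_fma d fee ci).1 = pvG dp0 fee ci ∧ pvI dp0 fee (pvA_fma d fee ci).2 := by
  by_cases hgt : ci > (fee.length : Int) - 1
  · have hA : pvA_fma d fee ci = (0, d) := by rw [pvA_fma]; simp [hgt]
    have hG : pvG dp0 fee ci = 0 := by rw [pvG]; simp [hgt]
    rw [hA, hG]; exact ⟨rfl, hI⟩
  · obtain ⟨hlen, hinv⟩ := hI
    by_cases hz : PySem.List.pyGetD d ci 0 = 0
    · have hdp0 : PySem.List.pyGetD dp0 ci 0 = 0 := by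
        rcases hinv ci hci with h1 | ⟨_, _, h3⟩
        · rw [← h1]; exact hz
        · exact h3
      have hGeq : pvG dp0 fee ci = PySem.List.pyGetD fee ci 0 +
          min (min (pvG dp0 fee (ci + 1)) (pvG dp0 fee (ci + 2))) (pvG dp0 fee (ci + 3)) := by
        rw [pvG]; simp [hgt, hdp0]
      have ih1 := pvA_correct dp0 fee hn (ci + 1) (by omega) d ⟨hlen, hinv⟩
      have ih2 := pvA_correct dp0 fee hn (ci + 2) (by omega) (pvA_fma d fee (ci + 1)).2 ih1.2
      have ih3 := pvA_correct dp0 fee hn (ci + 3) (by omega)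
        (pvA_fma (pvA_fma d fee (ci + 1)).2 fee (ci + 2)).2 ih2.2
      obtain ⟨hlen3, hinv3⟩ := ih3.2
      have key : pvA_fma d fee ci =
          (PySem.List.pyGetD (PySem.List.pySetD
              (pvA_fma (pvA_fma (pvA_fma d fee (ci + 1)).2 fee (ci + 2)).2 fee (ci + 3)).2 ci
              (PySem.List.pyGetD fee ci 0 +
                min (min (pvA_fma d fee (ci + 1)).1
                    (pvA_fma (pvA_fma d fee (ci + 1)).2 fee (ci + 2)).1)
                  (pvA_fma (pvA_fma (pvA_fma d fee (ci + 1)).2 fee (ci + 2)).2 fee (ci + 3)).1)) ci 0,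
            PySem.List.pySetD
              (pvA_fma (pvA_fma (pvA_fma d fee (ci + 1)).2 fee (ci + 2)).2 fee (ci + 3)).2 ci
              (PySem.List.pyGetD fee ci 0 +
                min (min (pvA_fma d fee (ci + 1)).1
                    (pvA_fma (pvA_fma d fee (ci + 1)).2 fee (ci + 2)).1)
                  (pvA_fma (pvA_fma (pvA_fma d fee (ci + 1)).2 fee (ci + 2)).2 fee (ci + 3)).1)) := by
        rw [pvA_fma]; simp [hgt, hz]
      have hv : PySem.List.pyGetD fee ci 0 +
          min (min (pvA_fma d fee (ci + 1)).1
              (pvA_fma (pvA_fma d fee (ci + 1)).2 fee (ci + 2)).1)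
            (pvA_fma (pvA_fma (pvA_fma d fee (ci + 1)).2 fee (ci + 2)).2 fee (ci + 3)).1
          = pvG dp0 fee ci := by
        rw [hGeq, ih1.1, ih2.1, ih3.1]
      have hciLt : ci < (((pvA_fma (pvA_fma (pvA_fma d fee (ci + 1)).2 fee (ci + 2)).2 fee
          (ci + 3)).2).length : Int) := by rw [hlen3]; omega
      have hget := pvGetD_setD_self
        (pvA_fma (pvA_fma (pvA_fma d fee (ci + 1)).2 fee (ci + 2)).2 fee (ci + 3)).2 ci
        (PySem.List.pyGetD fee ci 0 +
          min (min (pvA_fma d fee (ci + 1)).1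
              (pvA_fma (pvA_fma d fee (ci + 1)).2 fee (ci + 2)).1)
            (pvA_fma (pvA_fma (pvA_fma d fee (ci + 1)).2 fee (ci + 2)).2 fee (ci + 3)).1)
        hci hciLt
      rw [key]
      refine ⟨by rw [hget, hv], ?_, ?_⟩
      · rw [PySem.List.length_pySetD]; exact hlen3
      · intro j hj0
        by_cases hji : j = ci
        · subst hji
          exact Or.inr ⟨by omega, by rw [hget, hv], hdp0⟩
        · rw [pvGetD_setD_ne _ ci j _ hci hj0 hji]
          exact hinv3 j hj0
    · have key : pvA_fma d fee ci = (PySem.List.pyGetD d ci 0, d) := by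
        rw [pvA_fma]; simp [hgt, hz]
      rw [key]
      refine ⟨?_, hlen, hinv⟩
      rcases hinv ci hci with h1 | ⟨_, h2, _⟩
      · rw [h1, pvG]
        have : PySem.List.pyGetD dp0 ci 0 ≠ 0 := by rw [← h1]; exact hz
        simp [hgt, this]
      · exact h2
termination_by ((fee.length : Int) - ci).toNat
decreasing_by all_goals omega

lemma pvB_loop (dp0 fee : List Int) (hn : (fee.length : Int) ≤ (dp0.length : Int))
    (ci : Int) (hci : 0 ≤ ci) (i : Int) (hi2 : i ≤ (fee.length : Int) - 1)
    (d : List Int) (hd : d.length = dp0.length)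
    (hlow : ∀ j : Int, 0 ≤ j → j ≤ i → PySem.List.pyGetD d j 0 = PySem.List.pyGetD dp0 j 0)
    (hhigh : ∀ j : Int, i < j → j ≤ (fee.length : Int) - 1 →
      PySem.List.pyGetD d j 0 = pvG dp0 fee j) :
    ∀ j : Int, ci ≤ j → j ≤ (fee.length : Int) - 1 →
      PySem.List.pyGetD
        ((PySem.List.pyRange i (ci - 1) (-1)).foldl (pvB_step fee (fee.length : Int)) d) j 0
        = pvG dp0 fee j := by
  by_cases hbase : i ≤ ci - 1
  · rw [PySem.List.pyRange_neg_one_eq_nil hbase]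
    intro j hj1 hj2
    exact hhigh j (by omega) hj2
  · have hlt : ci - 1 < i := by omega
    rw [PySem.List.pyRange_neg_one_cons hlt, List.foldl_cons]
    have hi0 : 0 ≤ i := by omega
    have hiLt : i < ((d.length : Int)) := by rw [hd]; omega
    have step_props : (pvB_step fee (fee.length : Int) d i).length = dp0.length ∧
        (∀ j : Int, 0 ≤ j → j ≤ i - 1 →
          PySem.List.pyGetD (pvB_step fee (fee.length : Int) d i) j 0 = PySem.List.pyGetD dp0 j 0) ∧
        (∀ j : Int, i - 1 < j → j ≤ (fee.length : Int) - 1 →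
          PySem.List.pyGetD (pvB_step fee (fee.length : Int) d i) j 0 = pvG dp0 fee j) := by
      by_cases hz : PySem.List.pyGetD d i 0 = 0
      · have hdp0i : PySem.List.pyGetD dp0 i 0 = 0 := by
          rw [← hlow i hi0 le_rfl]; exact hz
        have hs : ∀ k : Int, 0 < k → k ≤ 3 →
            (if i + k ≤ (fee.length : Int) - 1 then PySem.List.pyGetD d (i + k) 0 else 0)
              = pvG dp0 fee (i + k) := by
          intro k hk1 hk2
          by_cases hin : i + k ≤ (fee.length : Int) - 1
          · rw [if_pos hin]; exact hhigh (i + k) (by omega) hin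
          · rw [if_neg hin, pvG]; simp [show i + k > (fee.length : Int) - 1 by omega]
        have hstep : pvB_step fee (fee.length : Int) d i =
            PySem.List.pySetD d i (PySem.List.pyGetD fee i 0 +
              min (min (pvG dp0 fee (i + 1)) (pvG dp0 fee (i + 2))) (pvG dp0 fee (i + 3))) := by
          rw [pvB_step]
          rw [if_pos hz, hs 1 (by omega) (by omega), hs 2 (by omega) (by omega),
              hs 3 (by omega) (by omega)]
        have hvG : pvG dp0 fee i = PySem.List.pyGetD fee i 0 +
            min (min (pvG dp0 fee (i + 1)) (pvG dp0 fee (i + 2))) (pvG dp0 fee (i + 3)) := by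
          rw [pvG]; simp [show ¬ i > (fee.length : Int) - 1 by omega, hdp0i]
        rw [hstep]
        refine ⟨by rw [PySem.List.length_pySetD]; exact hd, ?_, ?_⟩
        · intro j hj0 hji
          rw [pvGetD_setD_ne d i j _ hi0 hj0 (by omega)]
          exact hlow j hj0 (by omega)
        · intro j hj1 hj2
          by_cases hji : j = i
          · rw [hji, pvGetD_setD_self d i _ hi0 hiLt, hvG]
          · rw [pvGetD_setD_ne d i j _ hi0 (by omega) hji]
            exact hhigh j (by omega) hj2
      · have hstep : pvB_step fee (fee.length : Int) d i = d := by
          rw [pvB_step, if_neg hz]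
        rw [hstep]
        refine ⟨hd, ?_, ?_⟩
        · intro j hj0 hji; exact hlow j hj0 (by omega)
        · intro j hj1 hj2
          by_cases hji : j = i
          · rw [hji, hlow i hi0 le_rfl]
            rw [hlow i hi0 le_rfl] at hz
            rw [pvG]
            simp [show ¬ i > (fee.length : Int) - 1 by omega, hz]
          · exact hhigh j (by omega) hj2
    exact pvB_loop dp0 fee hn ci hci (i - 1) (by omega) _ step_props.1 step_props.2.1
      step_props.2.2
termination_by (i - ci + 1).toNat
decreasing_by omega

-- ===== VERDICT (by name: the statement is the Claim_ definition above) =====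
theorem find_min_fee_memoization_recursive_spec : Claim_equal_find_min_fee_memoization_recursive := by
  intro dp fee ci _ hpre
  unfold Spec_find_min_fee_memoization_recursive
  unfold find_min_fee_memoization_recursive find_min_fee_memoization_recursive_alt
  by_cases hgt : ci > (fee.length : Int) - 1
  · rw [pvA_fma]; simp [hgt]
  · rcases hpre with h | ⟨hci, hn⟩ | ⟨hin, hnz⟩
    · exact absurd h hgt
    · have hA := (pvA_correct dp fee hn ci hci dp ⟨rfl, fun j _ => Or.inl rfl⟩).1
      by_cases hz : PySem.List.pyGetD dp ci 0 = 0
      · have hB := pvB_loop dp fee hn ci hci ((fee.length : Int) - 1) le_rfl dp rfl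
          (fun j _ _ => rfl) (fun j hj1 hj2 => absurd hj2 (by omega))
          ci le_rfl (by omega)
        simp only [hgt, ite_not]
        rw [hA, if_pos hz, hB]
        simp
      · simp only [hgt, ite_not, if_neg hz]
        rw [hA, pvG]
        have hnz0 : PySem.List.pyGetD dp ci 0 ≠ 0 := hz
        simp [hgt, hnz0]
    · have hA : (pvA_fma dp fee ci).1 = PySem.List.pyGetD dp ci 0 := by
        rw [pvA_fma]; simp [hgt, hnz]
      simp only [hgt, ite_not, if_neg hnz]
      exact hA
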